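-- pv_equiv track=rewrite | github.com/Tsukumi233/hotaru-code | src/hotaru/patch/patch.py | _seek_sequence
-- ===== SOURCE A (Python) =====
-- from typing import List, Optional, Sequence, Union
--
-- def _seek_sequence(haystack: Sequence[str], needle: Sequence[str], start: int) -> int:
--     if not needle:
--         return start
--     max_start = len(haystack) - len(needle)
--     for idx in range(max(start, 0), max_start + 1):
--         if list(haystack[idx : idx + len(needle)]) == list(needle):
--             return idx
--     return -1
-- ===== SOURCE B (Python) =====
-- def _seek_sequence(haystack, needle, start):
--     if not needle:
--         return start
--     lo = max(start, 0)
--     if lo > len(haystack) - len(needle):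
--         return -1
--     sep = '\x00'
--     text = sep.join([''] + list(haystack) + [''])
--     pat = sep.join([''] + list(needle) + [''])
--     off = lo + sum(map(len, haystack[:lo]))
--     pos = text.find(pat, off)
--     return -1 if pos == -1 else text.count(sep, 0, pos)
-- ===== Notes on version B (the rewrite author's own statement) =====
-- stated objective: alternative
-- what changed: B replaces A's Python-level window scan (which builds and compares a length-m slice at every candidate index) by flattening haystack and needle into NUL-delimited strings, finding the pattern with one substring find on the flat text, and mapping the found character offset back to a list index with a bounded count of separators.
import Mathlib
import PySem

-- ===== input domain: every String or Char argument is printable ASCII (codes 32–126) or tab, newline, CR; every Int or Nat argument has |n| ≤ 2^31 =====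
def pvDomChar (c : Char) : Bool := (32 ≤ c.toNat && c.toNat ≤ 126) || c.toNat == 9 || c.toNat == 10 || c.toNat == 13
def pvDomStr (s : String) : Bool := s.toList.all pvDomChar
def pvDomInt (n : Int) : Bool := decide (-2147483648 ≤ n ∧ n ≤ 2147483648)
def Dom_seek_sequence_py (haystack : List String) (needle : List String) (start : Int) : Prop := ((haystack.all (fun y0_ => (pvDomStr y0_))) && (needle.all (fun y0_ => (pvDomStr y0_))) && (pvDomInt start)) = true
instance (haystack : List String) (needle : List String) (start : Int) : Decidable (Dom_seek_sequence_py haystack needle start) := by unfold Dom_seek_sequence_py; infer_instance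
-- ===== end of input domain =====

-- B replaces A's position-by-position slice-and-compare scan by flattening both lists into
-- NUL-delimited strings and delegating the whole search to a single substring find on the flat
-- text, decoding the match offset back to a token index (objective: alternative).

-- ===== PORT A =====
-- the 'for idx in range(...)' loop with early return
def seekALoop (haystack : List String) (needle : List String) : List Int → Int
  | [] => -1
  | idx :: r =>
    if PySem.List.slice haystack (some idx) (some (idx + (needle.length : Int))) = needle then idx
    else seekALoop haystack needle r

def seek_sequence_py (haystack : List String) (needle : List String) (start : Int) : Int :=
  if needle = [] then start
  else
    let max_start : Int := (haystack.length : Int) - (needle.length : Int)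
    seekALoop haystack needle (PySem.List.pyRange (max start 0) (max_start + 1) 1)

-- ===== PORT B =====
def seek_sequence_py_alt (haystack : List String) (needle : List String) (start : Int) : Int :=
  if needle = [] then start
  else
    let lo : Int := max start 0
    if lo > (haystack.length : Int) - (needle.length : Int) then -1
    else
      let sep : String := "\x00"
      let text : String := PySem.Str.join sep ([""] ++ haystack ++ [""])
      let pat : String := PySem.Str.join sep ([""] ++ needle ++ [""])
      let off : Int := lo + ((PySem.List.slice haystack none (some lo)).map PySem.Str.len).sum
      let pos : Int := PySem.Str.findFrom text pat off none
      if pos = -1 then -1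
      -- text.count(sep, 0, pos): a bounded str.count is exactly the count on the slice text[0:pos]
      else ((PySem.Str.count (PySem.Str.slice text (some 0) (some pos)) sep : Nat) : Int)

-- ===== PRECONDITION & SPEC =====
def Spec_seek_sequence_py (haystack : List String) (needle : List String) (start : Int) (out : Int) : Prop := out = seek_sequence_py_alt haystack needle start
instance (haystack : List String) (needle : List String) (start : Int) (out : Int) : Decidable (Spec_seek_sequence_py haystack needle start out) := by unfold Spec_seek_sequence_py; infer_instance

-- ===== CLAIM (what is proved, stated in full; the proofs are below) =====
def Claim_equal_seek_sequence_py : Prop := ∀ (haystack : List String) (needle : List String) (start : Int), Dom_seek_sequence_py haystack needle start → Spec_seek_sequence_py haystack needle start (seek_sequence_py haystack needle start)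

-- ===== LEMMAS AND PROOFS =====

-- flat text of a token list: tokens separated AND terminated by NUL (without the leading NUL)
def pvG : List (List Char) → List Char
  | [] => []
  | t :: r => t ++ '\x00' :: pvG r

-- character offset of the separator that precedes token i in '\x00' :: pvG toks
def pvOff : List (List Char) → Nat → Nat
  | _, 0 => 0
  | [], _ + 1 => 0
  | t :: r, i + 1 => t.length + 1 + pvOff r i

theorem pvG_append (a b : List (List Char)) : pvG (a ++ b) = pvG a ++ pvG b := by
  induction a with
  | nil => rfl
  | cons t r ih => simp [pvG, ih]

theorem join_eq_pvG (toks : List (List Char)) :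
    PySem.Chars.join ['\x00'] (toks ++ [[]]) = pvG toks := by
  induction toks with
  | nil => simp [PySem.Chars.join_singleton, pvG]
  | cons t r ih =>
    cases r with
    | nil => simp [PySem.Chars.join_cons_cons, PySem.Chars.join_singleton, pvG]
    | cons q rest =>
      rw [List.cons_append, List.cons_append, PySem.Chars.join_cons_cons]
      rw [List.cons_append] at ih
      rw [ih]
      simp [pvG]

theorem text_eq_pvG (toks : List (List Char)) :
    PySem.Chars.join ['\x00'] ([[]] ++ toks ++ [[]]) = '\x00' :: pvG toks := by
  have h := join_eq_pvG toks
  cases toks with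
  | nil => simp [PySem.Chars.join_cons_cons, PySem.Chars.join_singleton, pvG]
  | cons t r =>
    have e : ([[]] ++ (t :: r) ++ [[]] : List (List Char)) = [] :: t :: (r ++ [[]]) := by simp
    rw [e, PySem.Chars.join_cons_cons]
    rw [List.cons_append] at h
    rw [h]
    rfl

theorem drop_pvOff (toks : List (List Char)) (i : Nat) (hi : i ≤ toks.length) :
    ('\x00' :: pvG toks).drop (pvOff toks i) = '\x00' :: pvG (toks.drop i) := by
  induction i generalizing toks with
  | zero => simp [pvOff]
  | succ i ih =>
    cases toks with
    | nil => simp at hi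
    | cons t r =>
      have e : ('\x00' :: pvG (t :: r)) = ('\x00' :: t) ++ ('\x00' :: pvG r) := by simp [pvG]
      have h2 : List.drop (t.length + 1 + pvOff r i) ('\x00' :: t) = [] :=
        List.drop_eq_nil_of_le (by simp)
      have h3 : t.length + 1 + pvOff r i - ('\x00' :: t).length = pvOff r i := by simp
      rw [e, pvOff, List.drop_append, h2, List.nil_append, h3]
      rw [ih r (by simpa using hi)]
      rfl

-- aligning two NUL-terminated segments of NUL-free tokens
theorem nul_align (a : List Char) : ∀ (b u v : List Char), '\x00' ∉ a → '\x00' ∉ b →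
    (a ++ '\x00' :: u <+: b ++ '\x00' :: v) → a = b ∧ u <+: v := by
  induction a with
  | nil =>
    intro b u v _ hb hp
    cases b with
    | nil => exact ⟨rfl, (List.cons_prefix_cons.mp hp).2⟩
    | cons x b' =>
      exfalso
      have := (List.cons_prefix_cons.mp hp).1
      exact hb (this ▸ List.mem_cons_self)
  | cons y a' ih =>
    intro b u v ha hb hp
    cases b with
    | nil =>
      exfalso
      have := (List.cons_prefix_cons.mp hp).1
      exact ha (by simp [this])
    | cons x b' =>
      rw [List.cons_append, List.cons_append, List.cons_prefix_cons] at hp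
      have := ih b' u v (fun hm => ha (List.mem_cons_of_mem _ hm))
        (fun hm => hb (List.mem_cons_of_mem _ hm)) hp.2
      exact ⟨by rw [hp.1, this.1], this.2⟩

theorem pvG_prefix_iff (nd : List (List Char)) : ∀ (toks : List (List Char)), nd ≠ [] →
    (∀ t ∈ nd, '\x00' ∉ t) → (∀ t ∈ toks, '\x00' ∉ t) →
    (pvG nd <+: pvG toks ↔ nd <+: toks) := by
  induction nd with
  | nil => intro toks h; exact absurd rfl h
  | cons t nd' ih =>
    intro toks _ hndf htf
    constructor
    · intro hp
      cases toks with
      | nil =>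
        exfalso
        simp [pvG] at hp
      | cons h0 r =>
        simp only [pvG] at hp
        have hal := nul_align t h0 (pvG nd') (pvG r)
          (hndf t List.mem_cons_self) (htf h0 List.mem_cons_self) hp
        rcases hal with ⟨hth, hrest⟩
        cases nd' with
        | nil => exact hth ▸ List.cons_prefix_cons.mpr ⟨rfl, List.nil_prefix⟩
        | cons q nd'' =>
          have := (ih r (by simp) (fun x hx => hndf x (List.mem_cons_of_mem _ hx))
            (fun x hx => htf x (List.mem_cons_of_mem _ hx))).mp hrest
          exact hth ▸ List.cons_prefix_cons.mpr ⟨rfl, this⟩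
    · intro hp
      rcases hp with ⟨rest, hrest⟩
      rw [← hrest, pvG_append]
      exact List.prefix_append _ _

-- decoding one token segment of the text
theorem occ_seg (h : List Char) : ∀ (rest s : List Char) (j : Nat), '\x00' ∉ h →
    (('\x00' :: s) <+: (h ++ '\x00' :: rest).drop j) →
    (∃ k, j = h.length + k ∧ ('\x00' :: s) <+: ('\x00' :: rest).drop k) := by
  induction h with
  | nil =>
    intro rest s j _ hp
    exact ⟨j, by simp, by simpa using hp⟩
  | cons x h' ih =>
    intro rest s j hx hp
    cases j with
    | zero =>
      exfalso
      have := (List.cons_prefix_cons.mp (by simpa using hp)).1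
      exact hx (by simp [← this])
    | succ j' =>
      have hp' : ('\x00' :: s) <+: (h' ++ '\x00' :: rest).drop j' := by simpa using hp
      rcases ih rest s j' (fun hm => hx (List.mem_cons_of_mem _ hm)) hp' with ⟨k, hk, hpre⟩
      exact ⟨k, by simp [hk]; omega, hpre⟩

-- every occurrence of the NUL-delimited pattern in the NUL-delimited text sits on a separator
theorem occ_decode (nd : List (List Char)) (hnd : nd ≠ []) (hndf : ∀ t ∈ nd, '\x00' ∉ t) :
    ∀ (toks : List (List Char)) (j : Nat), (∀ t ∈ toks, '\x00' ∉ t) →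
    (('\x00' :: pvG nd) <+: ('\x00' :: pvG toks).drop j) →
    ∃ i, i ≤ toks.length ∧ j = pvOff toks i ∧ nd <+: toks.drop i := by
  intro toks
  induction toks with
  | nil =>
    intro j _ hp
    exfalso
    cases j with
    | zero =>
      have hlen := hp.length_le
      cases nd with
      | nil => exact hnd rfl
      | cons t r => simp [pvG] at hlen
    | succ j' => simp [pvG] at hp
  | cons t r ih =>
    intro j htf hp
    cases j with
    | zero =>
      refine ⟨0, by simp, by simp [pvOff], ?_⟩
      have hpp : pvG nd <+: pvG (t :: r) := by simpa using hp
      exact (pvG_prefix_iff nd (t :: r) hnd hndf htf).mp hpp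
    | succ j'' =>
      have hp' : ('\x00' :: pvG nd) <+: (t ++ '\x00' :: pvG r).drop j'' := by
        simpa [pvG] using hp
      rcases occ_seg t (pvG r) (pvG nd) j'' (htf t List.mem_cons_self) hp' with ⟨k, hk, hpre⟩
      rcases ih k (fun x hx => htf x (List.mem_cons_of_mem _ hx)) hpre with ⟨i, hile, hoff, hndp⟩
      refine ⟨i + 1, by simpa using hile, ?_, by simpa using hndp⟩
      simp [pvOff]
      omega

theorem occ_encode (nd toks : List (List Char)) (i : Nat) (hi : i ≤ toks.length)
    (hp : nd <+: toks.drop i) :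
    ('\x00' :: pvG nd) <+: ('\x00' :: pvG toks).drop (pvOff toks i) := by
  rw [drop_pvOff toks i hi]
  rcases hp with ⟨rest, hrest⟩
  rw [← hrest, pvG_append]
  exact List.cons_prefix_cons.mpr ⟨rfl, List.prefix_append _ _⟩

theorem pvOff_zero (toks : List (List Char)) : pvOff toks 0 = 0 := by cases toks <;> rfl

theorem pvOff_succ_lt (toks : List (List Char)) : ∀ i : Nat, i < toks.length →
    pvOff toks i < pvOff toks (i + 1) := by
  induction toks with
  | nil => intro i h; simp at h
  | cons t r ih =>
    intro i h
    cases i with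
    | zero => rw [pvOff_zero]; simp [pvOff]
    | succ i0 =>
      simp only [pvOff]
      have := ih i0 (by simpa using h)
      omega

theorem pvOff_le (toks : List (List Char)) : ∀ (i' i : Nat), i ≤ i' → i' ≤ toks.length →
    pvOff toks i ≤ pvOff toks i' := by
  intro i'
  induction i' with
  | zero =>
    intro i h _
    have : i = 0 := by omega
    subst this
    exact le_refl _
  | succ k ih =>
    intro i h hlen
    rcases Nat.eq_or_lt_of_le h with he | hl
    · subst he; exact le_refl _
    · exact le_trans (ih i (by omega) (by omega)) (le_of_lt (pvOff_succ_lt toks k (by omega)))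

theorem pvOff_lt (toks : List (List Char)) : ∀ i i' : Nat, i < i' → i' ≤ toks.length →
    pvOff toks i < pvOff toks i' := by
  intro i i' h hlen
  obtain ⟨k, rfl⟩ : ∃ k, i' = k + 1 := ⟨i' - 1, by omega⟩
  exact lt_of_le_of_lt (pvOff_le toks k i (by omega) (by omega)) (pvOff_succ_lt toks k (by omega))

theorem pvOff_lt_length (toks : List (List Char)) (i : Nat) (hi : i ≤ toks.length) :
    pvOff toks i < ('\x00' :: pvG toks).length := by
  have h := drop_pvOff toks i hi
  have hne : ('\x00' :: pvG toks).drop (pvOff toks i) ≠ [] := by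
    rw [h]; exact List.cons_ne_nil _ _
  rcases Nat.lt_or_ge (pvOff toks i) (('\x00' :: pvG toks).length) with hlt | hge
  · exact hlt
  · exact absurd (List.drop_eq_nil_of_le hge) hne

theorem count_take_pvOff (toks : List (List Char)) : ∀ i : Nat, (∀ t ∈ toks, '\x00' ∉ t) →
    i ≤ toks.length →
    (('\x00' :: pvG toks).take (pvOff toks i)).count '\x00' = i := by
  intro i hf hi
  induction i generalizing toks with
  | zero => simp [pvOff]
  | succ i ih =>
    cases toks with
    | nil => simp at hi
    | cons t r =>
      have e1 : pvOff (t :: r) (i + 1) = (t.length + pvOff r i) + 1 := by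
        simp [pvOff]; omega
      have e2 : ('\x00' :: pvG (t :: r)).take ((t.length + pvOff r i) + 1)
          = '\x00' :: ((t ++ '\x00' :: pvG r).take (t.length + pvOff r i)) := by
        simp [pvG, List.take_succ_cons]
      have e3 : (t ++ '\x00' :: pvG r).take (t.length + pvOff r i)
          = t ++ ('\x00' :: pvG r).take (pvOff r i) := by
        rw [List.take_append]
        congr 1
        · exact List.take_of_length_le (by omega)
        · congr 1
          omega
      rw [e1, e2, e3]
      have hcnt_t : t.count '\x00' = 0 :=
        List.count_eq_zero.mpr (hf t List.mem_cons_self)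
      have hrec := ih r (fun x hx => hf x (List.mem_cons_of_mem _ hx)) (by simpa using hi)
      simp [List.count_append, hcnt_t, hrec]

theorem go_single (c : Char) : ∀ (fuel : Nat) (l : List Char) (acc : Nat), l.length ≤ fuel →
    PySem.Chars.count.go [c] fuel l acc = acc + l.count c := by
  intro fuel
  induction fuel with
  | zero =>
    intro l acc h
    have : l = [] := List.eq_nil_of_length_eq_zero (by omega)
    subst this
    rw [PySem.Chars.count.go]
    simp
  | succ f ih =>
    intro l acc h
    cases l with
    | nil =>
      rw [PySem.Chars.count.go]
      simp
      omega
    | cons x t =>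
      rw [PySem.Chars.count.go]
      by_cases hc : c = x
      · subst hc
        have hpre : List.isPrefixOf [c] (c :: t) = true := by simp [List.isPrefixOf]
        simp only [hpre, if_true]
        have hdrop : List.drop ([c] : List Char).length (c :: t) = t := rfl
        rw [hdrop, ih t (acc + 1) (by simpa using h)]
        simp
        omega
      · have hpre : List.isPrefixOf [c] (x :: t) = false := by
          simp [List.isPrefixOf]
          exact fun he => hc he
        simp only [hpre]
        rw [ih t acc (by simpa using h)]
        simp [List.count_cons]
        intro he
        exact absurd he.symm hc

theorem count_single (l : List Char) (c : Char) : PySem.Chars.count l [c] = l.count c := by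
  rw [PySem.Chars.count]
  simp
  rw [go_single c l.length l 0 (le_refl _)]
  simp

theorem pvOff_eq_sum (toks : List (List Char)) : ∀ i : Nat, i ≤ toks.length →
    pvOff toks i = i + ((toks.take i).map List.length).sum := by
  intro i
  induction i generalizing toks with
  | zero => intro _; simp [pvOff_zero]
  | succ i ih =>
    intro hi
    cases toks with
    | nil => simp at hi
    | cons t r =>
      simp only [pvOff, List.take_succ_cons, List.map_cons, List.sum_cons]
      have := ih r (by simpa using hi)
      omega

-- A's test at a nonnegative index is the tokens-prefix property
theorem testIff (hs nd : List String) (i : Int) (h0 : 0 ≤ i) :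
    (PySem.List.slice hs (some i) (some (i + (nd.length : Int))) = nd) ↔ nd <+: hs.drop i.toNat := by
  rw [PySem.List.slice_toNat _ h0 (by omega)]
  have he : (i + (nd.length : Int)).toNat - i.toNat = nd.length := by omega
  rw [he]
  constructor
  · intro hsl
    rw [← hsl]
    exact List.take_prefix _ _
  · intro hp
    exact (List.prefix_iff_eq_take.mp hp).symm

theorem prefix_map_toList_iff (nd l : List String) :
    (nd.map String.toList <+: l.map String.toList) ↔ nd <+: l := by
  constructor
  · intro hp
    have h1 := List.prefix_iff_eq_take.mp hp
    rw [List.length_map, ← List.map_take] at h1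
    have h2 : nd = l.take nd.length :=
      List.map_injective_iff.mpr (fun a b hab => String.toList_inj.mp hab) h1
    rw [h2]
    exact List.take_prefix _ _
  · exact fun hp => hp.map _

-- behaviour of A's loop on a strictly increasing index list
theorem loopA_spec (hs nd : List String) : ∀ l : List Int, l.Pairwise (· < ·) →
    (seekALoop hs nd l = -1 ∧ ∀ i ∈ l, ¬ (PySem.List.slice hs (some i) (some (i + (nd.length : Int))) = nd))
    ∨ (seekALoop hs nd l ∈ l
        ∧ (PySem.List.slice hs (some (seekALoop hs nd l)) (some ((seekALoop hs nd l) + (nd.length : Int))) = nd)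
        ∧ ∀ i ∈ l, i < seekALoop hs nd l → ¬ (PySem.List.slice hs (some i) (some (i + (nd.length : Int))) = nd)) := by
  intro l
  induction l with
  | nil => intro _; left; exact ⟨rfl, by simp⟩
  | cons x t ih =>
    intro hpw
    rcases List.pairwise_cons.mp hpw with ⟨hxt, hpt⟩
    by_cases hx : PySem.List.slice hs (some x) (some (x + (nd.length : Int))) = nd
    · right
      have hl : seekALoop hs nd (x :: t) = x := by rw [seekALoop, if_pos hx]
      rw [hl]
      refine ⟨List.mem_cons_self, hx, ?_⟩
      intro i hi hlt
      rcases List.mem_cons.mp hi with rfl | hit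
      · omega
      · exact absurd (hxt i hit) (by omega)
    · have hl : seekALoop hs nd (x :: t) = seekALoop hs nd t := by rw [seekALoop, if_neg hx]
      rcases ih hpt with ⟨h1, h2⟩ | ⟨h1, h2, h3⟩
      · left
        refine ⟨by rw [hl, h1], ?_⟩
        intro i hi
        rcases List.mem_cons.mp hi with rfl | hit
        · exact hx
        · exact h2 i hit
      · right
        rw [hl]
        refine ⟨List.mem_cons_of_mem _ h1, h2, ?_⟩
        intro i hi hlt
        rcases List.mem_cons.mp hi with rfl | hit
        · exact hx
        · exact h3 i hit hlt

theorem dom_nul_free (l : List String) (h : l.all (fun s => pvDomStr s) = true) :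
    ∀ t ∈ l.map String.toList, '\x00' ∉ t := by
  intro t ht hmem
  rcases List.mem_map.mp ht with ⟨s, hs, rfl⟩
  have hd := List.all_eq_true.mp h s hs
  have hc := List.all_eq_true.mp (by simpa [pvDomStr] using hd) _ hmem
  simp [pvDomChar] at hc

theorem sum_len_take (l : List String) : ∀ (i : Nat),
    ((l.take i).map PySem.Str.len).sum = (((((l.map String.toList).take i).map List.length).sum : Nat) : Int) := by
  induction l with
  | nil => intro i; simp
  | cons a b ih =>
    intro i
    cases i with
    | zero => simp
    | succ j =>
      simp only [List.take_succ_cons, List.map_cons, List.sum_cons, PySem.Str.len_eq]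
      rw [ih j]
      push_cast
      ring

-- occurrences of the delimited pattern found below a separator offset decode to a matching token index
theorem occ_window (hs nd : List String) (hnd : nd ≠ [])
    (hndf : ∀ t ∈ nd.map String.toList, '\x00' ∉ t)
    (htf : ∀ t ∈ hs.map String.toList, '\x00' ∉ t)
    (j : Nat)
    (hp : ('\x00' :: pvG (nd.map String.toList)) <+: ('\x00' :: pvG (hs.map String.toList)).drop j) :
    ∃ i : Nat, j = pvOff (hs.map String.toList) i ∧ i ≤ hs.length - nd.length ∧ nd <+: hs.drop i := by
  rcases occ_decode (nd.map String.toList) (by simpa using hnd) hndf (hs.map String.toList) j htf hp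
    with ⟨i, hile, hoff, hpre⟩
  have hlen := hpre.length_le
  simp at hile hlen
  refine ⟨i, hoff, by omega, ?_⟩
  rw [← List.map_drop] at hpre
  exact (prefix_map_toList_iff nd (hs.drop i)).mp hpre

-- ===== VERDICT (by name: the statement is the Claim_ definition above) =====
theorem seek_sequence_py_spec : Claim_equal_seek_sequence_py := by
  intro hs nd start hdom
  unfold Spec_seek_sequence_py
  by_cases hndnil : nd = []
  · simp only [seek_sequence_py, seek_sequence_py_alt, if_pos hndnil]
  simp only [seek_sequence_py, seek_sequence_py_alt]
  rw [if_neg hndnil, if_neg hndnil]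
  unfold Dom_seek_sequence_py at hdom
  simp only [Bool.and_eq_true] at hdom
  obtain ⟨⟨hhsall, hndall⟩, -⟩ := hdom
  have htf := dom_nul_free hs hhsall
  have hndf := dom_nul_free nd hndall
  have hm1 : 1 ≤ nd.length := by cases nd with | nil => exact absurd rfl hndnil | cons a b => simp
  set lo : Int := max start 0 with hlo
  have hlo0 : (0 : Int) ≤ lo := by omega
  by_cases hgt : lo > (hs.length : Int) - (nd.length : Int)
  · rw [if_pos hgt]
    show seekALoop hs nd (PySem.List.pyRange lo (((hs.length : Int) - (nd.length : Int)) + 1) 1) = -1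
    rw [PySem.List.pyRange_one_eq_nil (by omega)]
    rfl
  rw [if_neg hgt]
  rw [not_lt] at hgt
  set toks := hs.map String.toList with htoks
  set ndT := nd.map String.toList with hndT
  have htoklen : toks.length = hs.length := by simp [htoks]
  have hndTlen : ndT.length = nd.length := by simp [hndT]
  set loN : Nat := lo.toNat with hloN
  have hloeq : (loN : Int) = lo := by omega
  have hloleN : loN ≤ hs.length - nd.length := by omega
  -- the flat text and pattern
  have htext : (PySem.Str.join "\x00" ([""] ++ hs ++ [""])).toList = '\x00' :: pvG toks := by
    rw [PySem.Str.toList_join]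
    have h1 : ("\x00" : String).toList = ['\x00'] := rfl
    have h2 : (([""] ++ hs ++ [""]).map String.toList) = [[]] ++ toks ++ [[]] := by simp [htoks]
    rw [h1, h2, text_eq_pvG]
  have hpat : (PySem.Str.join "\x00" ([""] ++ nd ++ [""])).toList = '\x00' :: pvG ndT := by
    rw [PySem.Str.toList_join]
    have h1 : ("\x00" : String).toList = ['\x00'] := rfl
    have h2 : (([""] ++ nd ++ [""]).map String.toList) = [[]] ++ ndT ++ [[]] := by simp [hndT]
    rw [h1, h2, text_eq_pvG]
  -- the start offset equals pvOff toks loN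
  have hoff : lo + ((PySem.List.slice hs none (some lo)).map PySem.Str.len).sum
      = ((pvOff toks loN : Nat) : Int) := by
    rw [PySem.List.slice_to hs hlo0, ← hloN, sum_len_take hs loN, ← htoks,
        pvOff_eq_sum toks loN (by omega)]
    push_cast
    omega
  rw [hoff, PySem.Str.findFrom_eq, htext, hpat]
  set textL := '\x00' :: pvG toks with htextL
  set patL := '\x00' :: pvG ndT with hpatL
  set k : Nat := pvOff toks loN with hkdef
  have hkle : k ≤ textL.length := le_of_lt (pvOff_lt_length toks loN (by omega))
  set pos : Int := PySem.Chars.findFrom textL patL (k : Int) none with hposdef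
  -- A's loop analysed
  rcases loopA_spec hs nd (PySem.List.pyRange lo ((hs.length : Int) - (nd.length : Int) + 1) 1)
      (PySem.List.pairwise_lt_pyRange_one _ _) with ⟨ha, hnone⟩ | ⟨hmem, htest, hminA⟩
  · -- no match: find must fail
    have hnoocc : ¬ patL <:+: textL.drop k := by
      intro hinf
      rcases List.infix_iff_prefix_suffix.mp hinf with ⟨t, hp1, hp2⟩
      have ht := List.suffix_iff_eq_drop.mp hp2
      rw [ht, List.drop_drop] at hp1
      rcases occ_window hs nd hndnil hndf htf _ hp1 with ⟨i, hioff, hile, hipre⟩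
      rw [← htoks] at hioff
      have himem : ((i : Nat) : Int) ∈ PySem.List.pyRange lo ((hs.length : Int) - (nd.length : Int) + 1) 1 := by
        rw [PySem.List.mem_pyRange_one]
        constructor
        · -- lo ≤ i since k = pvOff loN ≤ pvOff i forces loN ≤ i
          rcases Nat.lt_or_ge i loN with hlt | hge
          · exfalso
            have := pvOff_lt toks i loN hlt (by omega)
            omega
          · omega
        · omega
      have := hnone _ himem
      rw [testIff hs nd _ (by positivity)] at this
      simp at this
      exact this hipre
    have hfneg : pos = -1 := (PySem.Chars.findFrom_natCast_eq_neg_one_iff textL patL k hkle).mpr hnoocc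
    rw [ha, if_pos hfneg]
  · -- a match at a := seekALoop …; find returns its separator offset
    set a : Int := seekALoop hs nd (PySem.List.pyRange lo ((hs.length : Int) - (nd.length : Int) + 1) 1) with hadef
    rw [PySem.List.mem_pyRange_one] at hmem
    have ha0 : 0 ≤ a := by omega
    set aN : Nat := a.toNat with haN
    have haNle : aN ≤ hs.length - nd.length := by omega
    have hapre : nd <+: hs.drop aN := (testIff hs nd a ha0).mp htest
    have haT : ndT <+: toks.drop aN := by
      rw [htoks, hndT, ← List.map_drop]
      exact hapre.map _
    have hocc : patL <+: textL.drop (pvOff toks aN) :=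
      occ_encode ndT toks aN (by omega) haT
    have hkoff : k ≤ pvOff toks aN := pvOff_le toks aN loN (by omega) (by omega)
    have hne : pos ≠ -1 := by
      rw [hposdef]
      rw [ne_eq, PySem.Chars.findFrom_natCast_eq_neg_one_iff textL patL k hkle, not_not]
      have h1 : textL.drop (pvOff toks aN) = (textL.drop k).drop (pvOff toks aN - k) := by
        rw [List.drop_drop]
        congr 1
        omega
      rw [h1] at hocc
      exact hocc.isInfix.trans (List.drop_suffix _ _).isInfix
    obtain ⟨hkpos, hppos, hminpos⟩ := PySem.Chars.findFrom_natCast_spec textL patL k hkle hne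
    have hpos0 : (0 : Int) ≤ pos := by omega
    rcases occ_window hs nd hndnil hndf htf pos.toNat hppos with ⟨i₀, hioff, hile, hipre⟩
    rw [← htoks] at hioff
    have hi₀ge : loN ≤ i₀ := by
      rcases Nat.lt_or_ge i₀ loN with hlt | hge
      · exfalso
        have := pvOff_lt toks i₀ loN hlt (by omega)
        omega
      · exact hge
    have hi₀a : aN ≤ i₀ := by
      rcases Nat.lt_or_ge i₀ aN with hlt | hge
      · exfalso
        have himem : ((i₀ : Nat) : Int) ∈ PySem.List.pyRange lo ((hs.length : Int) - (nd.length : Int) + 1) 1 := by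
          rw [PySem.List.mem_pyRange_one]
          constructor
          · omega
          · omega
        have := hminA _ himem (by omega)
        rw [testIff hs nd _ (by positivity)] at this
        simp at this
        exact this hipre
      · exact hge
    have hoffge : pos.toNat ≤ pvOff toks aN := by
      rcases Nat.lt_or_ge (pvOff toks aN) pos.toNat with hlt | hge
      · exact absurd hocc (hminpos (pvOff toks aN) hkoff hlt)
      · exact hge
    have hi₀eq : i₀ = aN := by
      rcases Nat.lt_or_ge aN i₀ with hlt | hge
      · exfalso
        have := pvOff_lt toks aN i₀ hlt (by omega)
        omega
      · omega
    have hposval : pos.toNat = pvOff toks aN := by rw [hioff, hi₀eq]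
    rw [if_neg hne]
    -- the returned count equals aN
    have hslice : (PySem.Str.slice (PySem.Str.join "\x00" ([""] ++ hs ++ [""])) (some 0) (some pos)).toList
        = textL.take pos.toNat := by
      rw [PySem.Str.toList_slice, PySem.Chars.slice_eq_listSlice, htext]
      rw [PySem.List.slice_toNat _ (by omega) hpos0]
      simp
    have hcnt : PySem.Str.count (PySem.Str.slice (PySem.Str.join "\x00" ([""] ++ hs ++ [""])) (some 0) (some pos)) "\x00" = aN := by
      rw [PySem.Str.count_eq, hslice]
      have h1 : ("\x00" : String).toList = ['\x00'] := rfl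
      rw [h1, count_single, hposval]
      exact count_take_pvOff toks aN htf (by omega)
    rw [hcnt]
    omega
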